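-- pv_equiv track=rewrite | github.com/peaclab/E2EWatch | utils/utils.py | consecutive_filter
-- ===== SOURCE A (Python) =====
-- def consecutive_filter(seq,width):
--
--     result = []
--     for index in range(len(seq)):
--         tmp_set_list = list(set(seq[index:index+width]))
--         if len(tmp_set_list) == 1 and tmp_set_list[0] == seq[index]:
--             result.append(seq[index])
--         else:
--             result.append(0) #Assumes healthy label is 0
--
--     return result
-- ===== SOURCE B (Python) =====
-- def consecutive_filter(seq, width):
--     n = len(seq)
--     if width <= 0:
--         return [0] * n
--     out = []
--     run = 0
--     prev = None
--     rem = 0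
--     for x in reversed(seq):
--         run = run + 1 if rem > 0 and x == prev else 1
--         rem += 1
--         out.append(x if run >= min(width, rem) else 0)
--         prev = x
--     out.reverse()
--     return out
-- ===== Notes on version B (the rewrite author's own statement) =====
-- stated objective: faster
-- what changed: Replaces the per-index slice+set construction (O(n*width)) by a single backward pass that maintains the length of the current equal-element run and compares it to min(width, remaining), O(n).
-- outside the precondition, e.g. on consecutive_filter([2, 2, -1, 0], -2): A returns [2, 0, 0, 0], B returns [0, 0, 0, 0]
import Mathlib
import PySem

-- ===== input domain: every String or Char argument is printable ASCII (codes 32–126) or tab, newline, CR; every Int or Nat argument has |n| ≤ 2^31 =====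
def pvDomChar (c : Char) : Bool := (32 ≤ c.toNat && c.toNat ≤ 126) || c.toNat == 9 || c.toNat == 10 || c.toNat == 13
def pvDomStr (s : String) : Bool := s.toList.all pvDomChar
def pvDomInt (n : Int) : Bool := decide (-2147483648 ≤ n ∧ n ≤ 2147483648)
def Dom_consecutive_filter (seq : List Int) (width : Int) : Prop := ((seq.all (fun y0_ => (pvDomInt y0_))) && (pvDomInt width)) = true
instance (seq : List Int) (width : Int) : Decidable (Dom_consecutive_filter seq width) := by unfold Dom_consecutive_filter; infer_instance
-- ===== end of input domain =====

-- B replaces A's per-index slice+set test by one backward pass maintaining the current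
-- equal-run length (objective: faster; a timing run measures the speed-up).

-- ===== PORT A =====
def consecutive_filter (seq : List Int) (width : Int) : List Int :=
  (PySem.List.pyRange 0 (PySem.List.len seq) 1).foldl (fun result index =>
    let tmp_set_list : PySem.Set Int :=
      PySem.Set.ofList (PySem.List.slice seq (some index) (some (index + width)))
    if PySem.List.len tmp_set_list = 1 ∧
        PySem.List.pyGet? tmp_set_list 0 = PySem.List.pyGet? seq index then
      result ++ [PySem.List.pyGetD seq index 0]
    else
      result ++ [0]) []

-- ===== PORT B =====
-- state = (out, run, prev, rem), exactly Source B's four variables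
def consecutive_filter_alt (seq : List Int) (width : Int) : List Int :=
  if width ≤ 0 then List.replicate seq.length 0
  else
    let st := seq.reverse.foldl
      (fun (st : List Int × Int × Option Int × Int) x =>
        let run := if 0 < st.2.2.2 ∧ st.2.2.1 = some x then st.2.1 + 1 else 1
        let rem := st.2.2.2 + 1
        (st.1 ++ [if min width rem ≤ run then x else 0], run, some x, rem))
      ([], 0, none, 0)
    st.1.reverse

-- ===== PRECONDITION & SPEC =====
-- Pre_ excludes negative widths with -width < len(seq) (a negative window size, outside
-- the function's natural domain): exactly there A's slice seq[i:i+width] hits Python's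
-- negative-slice-end wraparound and tests a nonempty "window" reaching backwards from the
-- end of the list, while B returns all zeros.  A still returns a value there — see the
-- cite in claim.json.  (For width ≤ -len(seq) every slice is empty and A = B is proved.)
def Pre_consecutive_filter (seq : List Int) (width : Int) : Prop :=
  0 ≤ width ∨ (seq.length : Int) ≤ -width
instance (seq : List Int) (width : Int) : Decidable (Pre_consecutive_filter seq width) := by
  unfold Pre_consecutive_filter; infer_instance
def pvWitness_consecutive_filter : List Int × Int := ([1, 1, 2, 2, 2], 2)

def Spec_consecutive_filter (seq : List Int) (width : Int) (out : List Int) : Prop := out = consecutive_filter_alt seq width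
instance (seq : List Int) (width : Int) (out : List Int) : Decidable (Spec_consecutive_filter seq width out) := by unfold Spec_consecutive_filter; infer_instance

-- ===== CLAIM (what is proved, stated in full; the proofs are below) =====
def Claim_equal_consecutive_filter : Prop := ∀ (seq : List Int) (width : Int), Dom_consecutive_filter seq width → Pre_consecutive_filter seq width → Spec_consecutive_filter seq width (consecutive_filter seq width)

-- ===== LEMMAS AND PROOFS =====

-- all elements equal (and the list nonempty): the window test both programs decide
def allSame : List Int → Bool
  | [] => false
  | x :: xs => xs.all (· == x)

-- length of the maximal constant prefix
def runlen : List Int → Nat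
  | [] => 0
  | [_] => 1
  | x :: y :: t => if x = y then runlen (y :: t) + 1 else 1

-- the common specification: entry k is seq[k] iff the next min(width, n-k) window agrees
def specOut (w : Nat) : List Int → List Int
  | [] => []
  | x :: xs => (if allSame ((x :: xs).take w) then x else 0) :: specOut w xs

lemma runlen_pos : ∀ (l : List Int), l ≠ [] → 1 ≤ runlen l
  | [], h => absurd rfl h
  | [_], _ => le_refl 1
  | x :: y :: t, _ => by
      simp only [runlen]
      split <;> omega

lemma allSame_take_succ : ∀ (l : List Int) (m : Nat), l ≠ [] →
    (allSame (l.take (m + 1)) = true ↔ min (m + 1) l.length ≤ runlen l)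
  | [], _, h => absurd rfl h
  | [x], m, _ => by
      simp [allSame, runlen]
  | x :: y :: t, m, _ => by
      rcases m with _ | m'
      · have h1 := runlen_pos (x :: y :: t) (by simp)
        simp only [List.take_succ_cons, List.take_zero, allSame, List.all_nil,
          List.length_cons]
        constructor
        · intro _; omega
        · intro _; trivial
      · have ih := allSame_take_succ (y :: t) m' (by simp)
        by_cases hxy : x = y
        · subst hxy
          have hr : runlen (x :: x :: t) = runlen (x :: t) + 1 := by simp [runlen]
          simp only [List.take_succ_cons, allSame, List.all_cons, beq_self_eq_true,
            Bool.true_and] at ih ⊢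
          rw [ih, hr]
          simp only [List.length_cons]
          omega
        · have h1 : (y == x) = false := by
            simp only [beq_eq_false_iff_ne, ne_eq]
            exact fun h => hxy h.symm
          have hr : runlen (x :: y :: t) = 1 := by simp [runlen, hxy]
          simp only [List.take_succ_cons, allSame, List.all_cons, h1, Bool.false_and,
            hr, List.length_cons]
          constructor
          · intro h; exact absurd h (by simp)
          · intro h; omega

-- set(xs): the foldl of Set.add never shrinks, and stays put iff everything is already in
lemma setAdd_foldl_mono : ∀ (t s : List Int), s.length ≤ (List.foldl PySem.Set.add s t).length
  | [], _ => le_refl _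
  | y :: t, s => by
      have h := setAdd_foldl_mono t (PySem.Set.add s y)
      have h2 : s.length ≤ (PySem.Set.add s y).length := by
        rw [PySem.Set.add_eq_ite]
        split <;> simp
      simpa using le_trans h2 h

lemma setAdd_foldl_of_mem : ∀ (t s : List Int), (∀ y ∈ t, y ∈ s) →
    List.foldl PySem.Set.add s t = s
  | [], _, _ => rfl
  | y :: t, s, h => by
      have hy : y ∈ s := h y (by simp)
      simp only [List.foldl_cons, PySem.Set.add_of_mem hy]
      exact setAdd_foldl_of_mem t s (fun z hz => h z (by simp [hz]))

lemma setAdd_foldl_len_eq : ∀ (t s : List Int),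
    (List.foldl PySem.Set.add s t).length = s.length → ∀ y ∈ t, y ∈ s
  | [], _, _, y, hy => absurd hy (by simp)
  | z :: t, s, h, y, hy => by
      by_cases hz : z ∈ s
      · simp only [List.foldl_cons, PySem.Set.add_of_mem hz] at h
        rcases List.mem_cons.mp hy with rfl | hy'
        · exact hz
        · exact setAdd_foldl_len_eq t s h y hy'
      · exfalso
        have h2 : (PySem.Set.add s z).length = s.length + 1 := by
          rw [PySem.Set.add_of_not_mem hz]; simp
        have h3 := setAdd_foldl_mono t (PySem.Set.add s z)
        simp only [List.foldl_cons] at h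
        omega

-- A's per-index test is exactly allSame of the window
lemma acond_iff (v : List Int) (x0 : Int) (pyA : Option Int)
    (ha : v.head? = some x0 ∨ v = []) (hsa : pyA = some x0) :
    ((PySem.List.len (PySem.Set.ofList v) = 1 ∧
      PySem.List.pyGet? (PySem.Set.ofList v) 0 = pyA) ↔ allSame v = true) := by
  rcases v with _ | ⟨x, t⟩
  · rw [PySem.Set.ofList_nil]
    simp [PySem.List.len_eq, allSame]
  · have hx : x = x0 := by
      rcases ha with ha | ha
      · simpa using ha
      · simp at ha
    have hsa' : pyA = some x := by rw [hsa, hx]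
    have hfold : PySem.Set.ofList (x :: t) = List.foldl PySem.Set.add [x] t := by
      rw [PySem.Set.ofList_eq_foldl]; rfl
    constructor
    · rintro ⟨h1, _⟩
      rw [hfold] at h1
      simp only [PySem.List.len_eq] at h1
      have hall := setAdd_foldl_len_eq t [x] (by simpa using h1)
      simp only [allSame, List.all_eq_true]
      intro y hy
      have hyx : y = x := List.mem_singleton.mp (hall y hy)
      simp [hyx]
    · intro h
      simp only [allSame, List.all_eq_true] at h
      have heq : List.foldl PySem.Set.add [x] t = [x] :=
        setAdd_foldl_of_mem t [x] (fun y hy =>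
          List.mem_singleton.mpr (by simpa using h y hy))
      rw [hfold, heq]
      refine ⟨by simp, ?_⟩
      rw [hsa']
      exact PySem.List.pyGet?_zero_cons x []

-- the slice seq[k : k+width] for 0 ≤ width is the window (seq.drop k).take width.toNat
lemma slice_window (seq : List Int) (width : Int) (hw : 0 ≤ width) (k : Nat) :
    PySem.List.slice seq (some (k : Int)) (some ((k : Int) + width)) =
      (seq.drop k).take width.toNat := by
  rw [PySem.List.slice_toNat seq (a := (k : Int)) (b := (k : Int) + width)
    (by positivity) (by omega)]
  rw [show ((k : Int) + width).toNat - ((k : Int)).toNat = width.toNat from by omega,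
    show ((k : Int)).toNat = k from by omega]

-- A's loop body at an in-range index produces the allSame entry
lemma A_body (seq : List Int) (width : Int) (hw : 0 ≤ width) (result : List Int)
    (index : Int) (h0 : 0 ≤ index) (hn : index < (seq.length : Int)) :
    (let tmp_set_list : PySem.Set Int :=
      PySem.Set.ofList (PySem.List.slice seq (some index) (some (index + width)))
     if PySem.List.len tmp_set_list = 1 ∧
        PySem.List.pyGet? tmp_set_list 0 = PySem.List.pyGet? seq index then
      result ++ [PySem.List.pyGetD seq index 0]
     else
      result ++ [0])
    = result ++ [if allSame ((seq.drop index.toNat).take width.toNat)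
                  then seq.getD index.toNat 0 else 0] := by
  obtain ⟨k, rfl⟩ : ∃ k : Nat, index = (k : Int) := ⟨index.toNat, by omega⟩
  have hk : k < seq.length := by exact_mod_cast hn
  have hget : PySem.List.pyGet? seq (k : Int) = some seq[k] := by
    simp [List.getElem?_eq_getElem hk]
  have hha : ((seq.drop k).take width.toNat).head? = some seq[k] ∨
      (seq.drop k).take width.toNat = [] := by
    rcases hwt : width.toNat with _ | m
    · right; simp
    · left
      rw [List.head?_take, if_neg (by omega), List.head?_drop,
        List.getElem?_eq_getElem hk]
  simp only [slice_window seq width hw k]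
  rw [if_congr (acond_iff ((seq.drop k).take width.toNat) seq[k]
        (PySem.List.pyGet? seq (k : Int)) hha hget) rfl rfl]
  have hgd : PySem.List.pyGetD seq (k : Int) 0 = seq.getD k 0 := by simp
  rw [hgd]
  simp only [Int.toNat_natCast]
  split <;> rfl

-- unrolling A's fold over any in-range index list
lemma A_fold (seq : List Int) (width : Int) (hw : 0 ≤ width) :
    ∀ (idxs : List Int) (r : List Int), (∀ i ∈ idxs, 0 ≤ i ∧ i < (seq.length : Int)) →
    idxs.foldl (fun result index =>
      let tmp_set_list : PySem.Set Int :=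
        PySem.Set.ofList (PySem.List.slice seq (some index) (some (index + width)))
      if PySem.List.len tmp_set_list = 1 ∧
          PySem.List.pyGet? tmp_set_list 0 = PySem.List.pyGet? seq index then
        result ++ [PySem.List.pyGetD seq index 0]
      else
        result ++ [0]) r
    = r ++ idxs.map (fun index => if allSame ((seq.drop index.toNat).take width.toNat)
        then seq.getD index.toNat 0 else 0)
  | [], r, _ => by simp
  | i :: idxs, r, h => by
      have hi := h i (by simp)
      rw [List.foldl_cons, A_body seq width hw r i hi.1 hi.2,
        A_fold seq width hw idxs _ (fun j hj => h j (by simp [hj])),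
        List.map_cons, List.append_assoc]
      rfl

lemma specOut_eq_map : ∀ (l : List Int) (w : Nat),
    specOut w l = (List.range l.length).map
      (fun k => if allSame ((l.drop k).take w) then l.getD k 0 else 0)
  | [], _ => by simp [specOut]
  | x :: xs, w => by
      rw [List.length_cons, List.range_succ_eq_map, List.map_cons, List.map_map]
      simp only [List.drop_zero, List.getD_cons_zero, specOut]
      congr 1
      rw [specOut_eq_map xs w]
      apply List.map_congr_left
      intro k _
      simp [Function.comp]

-- A computes specOut width.toNat seq (for 0 ≤ width)
lemma A_char (seq : List Int) (width : Int) (hw : 0 ≤ width) :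
    consecutive_filter seq width = specOut width.toNat seq := by
  unfold consecutive_filter
  rw [PySem.List.len_eq,
    A_fold seq width hw (PySem.List.pyRange 0 (seq.length : Int) 1) []
      (fun i hi => by exact_mod_cast PySem.List.mem_pyRange_one.mp hi),
    PySem.List.pyRange_one]
  simp only [List.map_map, sub_zero, Int.toNat_natCast, List.nil_append, zero_add]
  rw [specOut_eq_map]
  apply List.map_congr_left
  intro k _
  simp [Function.comp]

lemma specOut_zero : ∀ (l : List Int), specOut 0 l = List.replicate l.length 0
  | [] => rfl
  | x :: xs => by
      simp [specOut, allSame, List.replicate_succ, specOut_zero xs]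

-- B's backward loop: the loop invariant, stated over foldr (the shape foldl_reverse gives)
lemma B_inv (width : Int) (hw : 1 ≤ width) : ∀ (l : List Int),
    l.foldr (fun (x : Int) (y : List Int × Int × Option Int × Int) =>
        (fun (st : List Int × Int × Option Int × Int) (x : Int) =>
          let run := if 0 < st.2.2.2 ∧ st.2.2.1 = some x then st.2.1 + 1 else 1
          let rem := st.2.2.2 + 1
          (st.1 ++ [if min width rem ≤ run then x else 0], run, some x, rem)) y x)
      ([], 0, none, 0)
    = ((specOut width.toNat l).reverse, ((runlen l : Nat) : Int), l.head?,
        ((l.length : Nat) : Int))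
  | [] => by simp [specOut, runlen]
  | x :: xs => by
      rw [List.foldr_cons, B_inv width hw xs]
      show ((specOut width.toNat xs).reverse ++ [_], _, some x, _) = _
      have hrun : (if 0 < ((xs.length : Nat) : Int) ∧ xs.head? = some x
          then ((runlen xs : Nat) : Int) + 1 else 1)
          = ((runlen (x :: xs) : Nat) : Int) := by
        rcases xs with _ | ⟨y, t⟩
        · simp [runlen]
        · by_cases hxy : x = y
          · subst hxy
            rw [if_pos ⟨by exact_mod_cast Nat.succ_pos t.length, rfl⟩]
            have : runlen (x :: x :: t) = runlen (x :: t) + 1 := by simp [runlen]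
            rw [this]
            push_cast
            ring
          · rw [if_neg (by
              rintro ⟨-, h⟩
              exact hxy (by simpa [eq_comm] using h))]
            simp [runlen, hxy]
      obtain ⟨m, hmw⟩ : ∃ m : Nat, width.toNat = m + 1 := ⟨width.toNat - 1, by omega⟩
      have hwi : width = (m : Int) + 1 := by omega
      have hentry : (if min width (((xs.length : Nat) : Int) + 1)
          ≤ (if 0 < ((xs.length : Nat) : Int) ∧ xs.head? = some x
              then ((runlen xs : Nat) : Int) + 1 else 1) then x else 0)
          = (if allSame ((x :: xs).take width.toNat) then x else 0) := by
        have hciff : (min width (((xs.length : Nat) : Int) + 1)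
            ≤ ((runlen (x :: xs) : Nat) : Int))
            ↔ (allSame ((x :: xs).take width.toNat) = true) := by
          rw [hmw, allSame_take_succ (x :: xs) m (by simp)]
          simp only [List.length_cons]
          omega
        rw [hrun, if_congr hciff rfl rfl]
      refine Prod.ext ?_ (Prod.ext (by rw [hrun])
        (Prod.ext rfl (by push_cast [List.length_cons]; omega)))
      show (specOut width.toNat xs).reverse ++ [_] = _
      rw [hentry,
        show specOut width.toNat (x :: xs)
          = (if allSame ((x :: xs).take width.toNat) then x else 0)
            :: specOut width.toNat xs from rfl,
        List.reverse_cons]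


-- width ≤ -len(seq): every slice seq[i:i+width] is empty, so A appends only zeros
lemma slice_nil_of_neg (seq : List Int) (width : Int) (hw : (seq.length : Int) ≤ -width)
    (k : Nat) (hk : k < seq.length) :
    PySem.List.slice seq (some (k : Int)) (some ((k : Int) + width)) = [] := by
  rw [← List.length_eq_zero_iff, PySem.List.length_slice seq ((k : Int)) ((k : Int) + width)]
  have hck : PySem.List.clampIdx seq.length (k : Int) = min k seq.length :=
    PySem.List.clampIdx_natCast _ _
  have h2 : PySem.List.clampIdx seq.length ((k : Int) + width) ≤ k := by
    unfold PySem.List.clampIdx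
    split <;> (try split) <;> omega
  omega

lemma A_fold_neg (seq : List Int) (width : Int) (hw : (seq.length : Int) ≤ -width) :
    ∀ (idxs : List Int) (r : List Int), (∀ i ∈ idxs, 0 ≤ i ∧ i < (seq.length : Int)) →
    idxs.foldl (fun result index =>
      let tmp_set_list : PySem.Set Int :=
        PySem.Set.ofList (PySem.List.slice seq (some index) (some (index + width)))
      if PySem.List.len tmp_set_list = 1 ∧
          PySem.List.pyGet? tmp_set_list 0 = PySem.List.pyGet? seq index then
        result ++ [PySem.List.pyGetD seq index 0]
      else
        result ++ [0]) r = r ++ idxs.map (fun _ => (0 : Int))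
  | [], r, _ => by simp
  | i :: idxs, r, h => by
      have hi := h i (by simp)
      obtain ⟨k, rfl⟩ : ∃ k : Nat, i = (k : Int) := ⟨i.toNat, by omega⟩
      have hk : k < seq.length := by exact_mod_cast hi.2
      rw [List.foldl_cons]
      show List.foldl _ (if PySem.List.len (PySem.Set.ofList
          (PySem.List.slice seq (some (k : Int)) (some ((k : Int) + width)))) = 1 ∧ _
        then _ else _) idxs = _
      rw [slice_nil_of_neg seq width hw k hk, PySem.Set.ofList_nil,
        if_neg (by simp [PySem.List.len_eq]),
        A_fold_neg seq width hw idxs _ (fun j hj => h j (by simp [hj])),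
        List.map_cons, List.append_assoc]
      rfl

lemma A_zero (seq : List Int) (width : Int) (hw : (seq.length : Int) ≤ -width) :
    consecutive_filter seq width = List.replicate seq.length 0 := by
  unfold consecutive_filter
  rw [PySem.List.len_eq,
    A_fold_neg seq width hw (PySem.List.pyRange 0 (seq.length : Int) 1) []
      (fun i hi => by exact_mod_cast PySem.List.mem_pyRange_one.mp hi),
    PySem.List.pyRange_one]
  simp [Function.comp_def, List.map_const']

-- B computes specOut width.toNat seq (for 1 ≤ width)
lemma B_char (seq : List Int) (width : Int) (hw : 1 ≤ width) :
    consecutive_filter_alt seq width = specOut width.toNat seq := by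
  unfold consecutive_filter_alt
  rw [if_neg (by omega)]
  simp only []
  rw [List.foldl_reverse, B_inv width hw seq]
  simp

-- ===== VERDICT (by name: the statement is the Claim_ definition above) =====
theorem consecutive_filter_spec : Claim_equal_consecutive_filter := by
  intro seq width hDom hPre
  unfold Pre_consecutive_filter at hPre
  unfold Spec_consecutive_filter
  by_cases hw : 0 ≤ width
  · rcases lt_or_ge width 1 with hlt | hge
    · have hw0 : width = 0 := by omega
      subst hw0
      rw [A_char seq 0 (by omega)]
      unfold consecutive_filter_alt
      rw [if_pos (by omega)]
      simpa using specOut_zero seq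
    · rw [A_char seq width (by omega), B_char seq width hge]
  · have hneg : (seq.length : Int) ≤ -width := by
      rcases hPre with h | h
      · exact absurd h hw
      · exact h
    rw [A_zero seq width hneg]
    unfold consecutive_filter_alt
    rw [if_pos (by omega)]
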